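-- pv_equiv track=rewrite | github.com/MondaleFelix/CS2 | markov.py | next_word_dict
-- ===== SOURCE A (Python) =====
-- def next_word_dict(word_list):
--     '''take word list, check word after word and create dictionary {word: [words after word]} '''
--     word_after_dict = {}
--     for i in range(-1, len(word_list)):
--         #
--         if i == -1:
--             word = "START"
--             word_after = word_list[i+1]
--         elif i == len(word_list)-1:
--             word = word_list[i]
--             word_after = "STOP"
--         else:
--             word = word_list[i]
--             word_after = word_list[i+1]
--         #
--         if word not in word_after_dict:
--             word_after_dict[word] = [word_after]
--         else:
--             word_after_dict[word].append(word_after)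
--
--     return word_after_dict
-- ===== SOURCE B (Python) =====
-- def next_word_dict(word_list):
--     '''take word list, check word after word and create dictionary {word: [words after word]} '''
--     pairs = [("START", word_list[0])]
--     pairs += [(word_list[i], word_list[i + 1] if i + 1 < len(word_list) else "STOP")
--               for i in range(len(word_list))]
--     keys = list(dict.fromkeys(a for a, _ in pairs))
--     return {k: [b for a, b in pairs if a == k] for k in keys}
-- ===== Notes on version B (the rewrite author's own statement) =====
-- stated objective: alternative
-- what changed: Replaces A's single-pass dict-of-lists append loop (range(-1,len) with a three-way sentinel branch) by a staged group-by: materialize the (word, successor) pair list, take distinct keys in first-occurrence order, and build each value list with a filter over the pairs; no dict is updated incrementally.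
import Mathlib
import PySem

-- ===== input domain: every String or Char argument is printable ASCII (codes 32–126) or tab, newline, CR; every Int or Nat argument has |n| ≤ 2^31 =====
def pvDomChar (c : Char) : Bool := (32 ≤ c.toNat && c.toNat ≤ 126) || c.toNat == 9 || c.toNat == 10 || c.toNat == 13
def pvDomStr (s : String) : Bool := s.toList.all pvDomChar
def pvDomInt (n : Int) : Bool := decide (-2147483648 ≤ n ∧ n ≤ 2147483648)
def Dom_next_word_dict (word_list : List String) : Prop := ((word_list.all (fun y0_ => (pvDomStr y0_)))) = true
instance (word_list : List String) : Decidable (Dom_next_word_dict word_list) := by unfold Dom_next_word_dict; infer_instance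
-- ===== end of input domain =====

-- B replaces A's incremental dict-of-lists append loop by a staged group-by over a
-- materialized pair list (distinct keys in first-occurrence order, filter per key); alternative.

-- ===== PORT A =====
-- literal port of A: for i in range(-1, len(word_list)) with the three-way branch;
-- word_list[i]/[i+1] are in range whenever word_list ≠ [] (Pre_), so pyGetD "" is exact there.
def next_word_dict (word_list : List String) : List (String × List String) :=
  ((PySem.List.pyRange (-1) (word_list.length : Int) 1).foldl
    (fun (d : PySem.Dict String (List String)) (i : Int) =>
      let p : String × String :=
        if i == -1 then
          ("START", PySem.List.pyGetD word_list (i + 1) "")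
        else if i == (word_list.length : Int) - 1 then
          (PySem.List.pyGetD word_list i "", "STOP")
        else
          (PySem.List.pyGetD word_list i "", PySem.List.pyGetD word_list (i + 1) "")
      if d.contains p.1 = false then d.insert p.1 [p.2]
      else d.modify p.1 [] (fun l => l ++ [p.2]))   -- word_after_dict[word].append(word_after)
    PySem.Dict.empty).items

-- ===== PORT B =====
-- literal port of Source B: pairs = [("START", word_list[0])] + [(w_i, w_{i+1} or "STOP") ...];
-- keys = list(dict.fromkeys(a for a,_ in pairs)) = PySem.List.dedup; dict comprehension = map with filter.
def next_word_dict_alt (word_list : List String) : List (String × List String) :=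
  let pairs : List (String × String) :=
    ("START", PySem.List.pyGetD word_list 0 "") ::
      (PySem.List.pyRange 0 (word_list.length : Int) 1).map (fun i =>
        (PySem.List.pyGetD word_list i "",
         if i + 1 < (word_list.length : Int) then PySem.List.pyGetD word_list (i + 1) "" else "STOP"))
  let keys : List String := PySem.List.dedup (pairs.map (·.1))
  keys.map (fun k => (k, (pairs.filter (fun p => p.1 == k)).map (·.2)))

-- ===== PRECONDITION & SPEC =====
-- Pre_ excludes only the empty list, on which both A and B raise IndexError (word_list[0]).
def Pre_next_word_dict (word_list : List String) : Prop := word_list ≠ []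
instance (word_list : List String) : Decidable (Pre_next_word_dict word_list) := by
  unfold Pre_next_word_dict; infer_instance
def pvWitness_next_word_dict : List String := ["the", "cat", "the"]
def Spec_next_word_dict (word_list : List String) (out : List (String × List String)) : Prop := out = next_word_dict_alt word_list
instance (word_list : List String) (out : List (String × List String)) : Decidable (Spec_next_word_dict word_list out) := by unfold Spec_next_word_dict; infer_instance

-- ===== CLAIM (what is proved, stated in full; the proofs are below) =====
def Claim_equal_next_word_dict : Prop := ∀ (word_list : List String), Dom_next_word_dict word_list → Pre_next_word_dict word_list → Spec_next_word_dict word_list (next_word_dict word_list)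

-- ===== LEMMAS AND PROOFS =====

-- A's loop body equals the plain modify step (insert-fresh or append = setdefault-append).
theorem nwd_step_eq (d : PySem.Dict String (List String)) (p : String × String) :
    (if d.contains p.1 = false then d.insert p.1 [p.2]
     else d.modify p.1 [] (fun l => l ++ [p.2]))
    = d.modify p.1 [] (fun l => l ++ [p.2]) := by
  by_cases h : d.contains p.1 = false
  · simp only [h, if_true]
    show d.insert p.1 [p.2] = d.insert p.1 (d.getD p.1 [] ++ [p.2])
    rw [PySem.Dict.getD_of_not_contains d ([] : List String) h]
    rfl
  · simp [h]

-- A's index list 0..n-1, mapped through A's (word, word_after) computation, is B's pair tail.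
theorem nwd_pairs_eq (w : String) (t : List String) :
    (PySem.List.pyRange 0 (((w :: t).length : Int)) 1).map
      (fun i =>
        if i == (-1 : Int) then
          ("START", PySem.List.pyGetD (w :: t) (i + 1) "")
        else if i == (((w :: t).length : Int)) - 1 then
          (PySem.List.pyGetD (w :: t) i "", "STOP")
        else
          (PySem.List.pyGetD (w :: t) i "", PySem.List.pyGetD (w :: t) (i + 1) ""))
    = (PySem.List.pyRange 0 (((w :: t).length : Int)) 1).map (fun i =>
        (PySem.List.pyGetD (w :: t) i "",
         if i + 1 < (((w :: t).length : Int)) then PySem.List.pyGetD (w :: t) (i + 1) "" else "STOP")) := by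
  apply List.ext_getElem
  · simp
  · intro k h1 h2
    have hk : k < t.length + 1 := by
      simpa [PySem.List.length_pyRange_one] using h1
    simp only [List.getElem_map, PySem.List.getElem_pyRange_one, zero_add]
    have hne : ((k : Int) == (-1 : Int)) = false := by simp
    by_cases hlast : k = t.length
    · have heq : ((k : Int) == (((w :: t).length : Int)) - 1) = true := by simp; omega
      have hlt : ¬ ((k : Int) + 1 < (((w :: t).length : Int))) := by simp; omega
      simp [hlast]
    · have heq : ((k : Int) == (((w :: t).length : Int)) - 1) = false := by simp; omega
      have hlt : ((k : Int) + 1 < (((w :: t).length : Int))) := by simp; omega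
      have hklt : k < t.length := by omega
      simp [hne, hlast, hklt]

-- the dict-of-lists fold over any pair list, read back as items, is the group-by.
theorem nwd_groupby (ps : List (String × String)) :
    ((ps.foldl (fun (d : PySem.Dict String (List String)) (p : String × String) =>
        d.modify p.1 [] (fun l => l ++ [p.2])) PySem.Dict.empty).items)
    = (PySem.List.dedup (ps.map (·.1))).map
        (fun k => (k, (ps.filter (fun p => p.1 == k)).map (·.2))) := by
  set D := ps.foldl (fun (d : PySem.Dict String (List String)) (p : String × String) =>
      d.modify p.1 [] (fun l => l ++ [p.2])) PySem.Dict.empty with hD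
  have hnd : D.keys.Nodup := by
    rw [hD]
    exact PySem.Dict.nodup_keys_foldl_modify_key ps (·.1) [] (fun _ p => fun l => l ++ [p.2])
      PySem.Dict.empty (by simp)
  have hkeys : D.keys = PySem.List.dedup (ps.map (·.1)) := by
    rw [hD]
    rw [PySem.Dict.keys_foldl_modify_key ps (·.1) [] (fun _ p => fun l => l ++ [p.2]) PySem.Dict.empty]
    simp [PySem.Dict.keys_empty, PySem.Set.update, PySem.Set.ofList_eq_foldl]
  have hget : ∀ k, D.getD k [] = (ps.filter (fun p => p.1 == k)).map (·.2) := by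
    intro k
    rw [hD, PySem.Dict.getD_foldl_modify_append]
    simp [PySem.Dict.getD_empty]
  rw [PySem.Dict.items_eq_map_keys D hnd ([] : List String), hkeys]
  apply List.map_congr_left
  intro k _
  rw [hget k]

-- A's index loop from any start dict equals the modify-fold over the mapped pair list.
theorem nwd_fold (w : String) (t : List String) (l : List Int) (d : PySem.Dict String (List String)) :
    l.foldl
      (fun (d : PySem.Dict String (List String)) (i : Int) =>
        let p : String × String :=
          if i == -1 then ("START", PySem.List.pyGetD (w :: t) (i + 1) "")
          else if i == (((w :: t).length : Int)) - 1 then (PySem.List.pyGetD (w :: t) i "", "STOP")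
          else (PySem.List.pyGetD (w :: t) i "", PySem.List.pyGetD (w :: t) (i + 1) "")
        if d.contains p.1 = false then d.insert p.1 [p.2]
        else d.modify p.1 [] (fun l => l ++ [p.2])) d
    = (l.map (fun i =>
        if i == (-1 : Int) then ("START", PySem.List.pyGetD (w :: t) (i + 1) "")
        else if i == (((w :: t).length : Int)) - 1 then (PySem.List.pyGetD (w :: t) i "", "STOP")
        else (PySem.List.pyGetD (w :: t) i "", PySem.List.pyGetD (w :: t) (i + 1) ""))).foldl
        (fun (d : PySem.Dict String (List String)) (p : String × String) =>
          d.modify p.1 [] (fun l => l ++ [p.2])) d := by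
  rw [List.foldl_map]
  congr 1
  funext d i
  exact nwd_step_eq d _

-- ===== VERDICT (by name: the statement is the Claim_ definition above) =====
theorem next_word_dict_spec : Claim_equal_next_word_dict := by
  intro ws _hdom hpre
  obtain ⟨w, t, rfl⟩ := List.exists_cons_of_ne_nil hpre
  unfold Spec_next_word_dict next_word_dict next_word_dict_alt
  have hlt : (-1 : Int) < (((w :: t).length : Int)) := by omega
  rw [nwd_fold w t]
  have hmap : (PySem.List.pyRange (-1) (((w :: t).length : Int)) 1).map
      (fun i =>
        if i == (-1 : Int) then ("START", PySem.List.pyGetD (w :: t) (i + 1) "")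
        else if i == (((w :: t).length : Int)) - 1 then (PySem.List.pyGetD (w :: t) i "", "STOP")
        else (PySem.List.pyGetD (w :: t) i "", PySem.List.pyGetD (w :: t) (i + 1) ""))
      = ("START", PySem.List.pyGetD (w :: t) 0 "") ::
          (PySem.List.pyRange 0 (((w :: t).length : Int)) 1).map (fun i =>
            (PySem.List.pyGetD (w :: t) i "",
             if i + 1 < (((w :: t).length : Int)) then PySem.List.pyGetD (w :: t) (i + 1) "" else "STOP")) := by
    rw [PySem.List.pyRange_one_cons hlt, List.map_cons,
      show ((-1 : Int) + 1) = 0 from rfl, nwd_pairs_eq w t]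
    congr 1
  rw [hmap, nwd_groupby]
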